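-- pv_equiv track=rewrite | github.com/xfactlab/xfact-nlp | src/xfact/nlp/scoring.py | lrp
-- ===== SOURCE A (Python) =====
-- def lrp(actual, predicted):
--     actual = list(actual)
--     predicted = list(predicted)
--     rank = 1
--     denom = 1
--     found = False
--     if len(predicted) and len(actual):
--         for p in reversed(predicted):
--             if p in actual and not found:
--                 found = True
--             elif p not in actual and found:
--                 rank += 1
--                 denom += 1
--             elif p not in actual:
--                 denom += 1
--     return found, rank, denom
-- ===== SOURCE B (Python) =====
-- def lrp(actual, predicted):
--     actual = list(actual)
--     predicted = list(predicted)
--     if not actual or not predicted: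
--         return False, 1, 1
--     hits = set(actual)
--     found = False
--     misses = 0   # total elements of predicted not in actual
--     tail = 0     # length of the current trailing run of misses
--     for p in predicted:
--         if p in hits:
--             found = True
--             tail = 0
--         else:
--             misses += 1
--             tail += 1
--     # misses strictly before the last hit = misses - tail (misses == tail when not found)
--     return found, 1 + misses - tail, 1 + misses
-- ===== Notes on version B (the rewrite author's own statement) =====
-- stated objective: faster
-- what changed: Replaces A's reverse scan with a stateful found-flag by one forward pass over a set of actual that keeps a total miss counter and the length of the trailing miss run; rank falls out as 1 + misses - trailing run.
import Mathlib
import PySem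

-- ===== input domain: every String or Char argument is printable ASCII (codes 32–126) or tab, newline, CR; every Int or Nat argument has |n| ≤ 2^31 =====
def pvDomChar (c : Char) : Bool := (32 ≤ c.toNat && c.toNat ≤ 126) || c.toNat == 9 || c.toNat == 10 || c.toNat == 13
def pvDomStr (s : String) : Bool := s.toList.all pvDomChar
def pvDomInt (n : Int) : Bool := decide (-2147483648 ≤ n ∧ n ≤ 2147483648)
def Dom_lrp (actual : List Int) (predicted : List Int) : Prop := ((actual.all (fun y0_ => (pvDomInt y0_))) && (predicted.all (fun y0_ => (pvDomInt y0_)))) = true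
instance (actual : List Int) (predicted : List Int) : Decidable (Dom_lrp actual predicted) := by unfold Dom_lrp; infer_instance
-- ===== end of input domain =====

-- B replaces A's reverse scan carrying a found-flag by one forward pass over a set of `actual`
-- keeping a total miss counter and the trailing miss-run length (objective: faster, O(n+m) vs O(n*m)).


-- ===== PORT A =====
-- A's loop body, state (found, rank, denom), branches in A's order
def lrpStep (actual : List Int) (s : Bool × Int × Int) (p : Int) : Bool × Int × Int :=
  if actual.contains p && !s.1 then (true, s.2.1, s.2.2)
  else if !(actual.contains p) && s.1 then (s.1, s.2.1 + 1, s.2.2 + 1)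
  else if !(actual.contains p) then (s.1, s.2.1, s.2.2 + 1)
  else s

def lrp (actual : List Int) (predicted : List Int) : Bool × Int × Int :=
  if predicted.length ≠ 0 ∧ actual.length ≠ 0 then
    predicted.reverse.foldl (lrpStep actual) (false, 1, 1)
  else (false, 1, 1)

-- ===== PORT B =====
-- B's loop body, state (tail, found, misses)
def lrpAltStep (hits : List Int) (s : Int × Bool × Int) (p : Int) : Int × Bool × Int :=
  if hits.contains p then (0, true, s.2.2) else (s.1 + 1, s.2.1, s.2.2 + 1)

def lrp_alt (actual : List Int) (predicted : List Int) : Bool × Int × Int :=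
  if actual = [] ∨ predicted = [] then (false, 1, 1)
  else
    let hits := PySem.Set.ofList actual
    let s := predicted.foldl (lrpAltStep hits) (0, false, 0)
    (s.2.1, 1 + s.2.2 - s.1, 1 + s.2.2)

-- ===== PRECONDITION & SPEC =====
def Spec_lrp (actual : List Int) (predicted : List Int) (out : Bool × Int × Int) : Prop := out = lrp_alt actual predicted
instance (actual : List Int) (predicted : List Int) (out : Bool × Int × Int) : Decidable (Spec_lrp actual predicted out) := by unfold Spec_lrp; infer_instance

-- ===== CLAIM (what is proved, stated in full; the proofs are below) =====
def Claim_equal_lrp : Prop := ∀ (actual : List Int) (predicted : List Int), Dom_lrp actual predicted → Spec_lrp actual predicted (lrp actual predicted)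

-- ===== LEMMAS AND PROOFS =====

-- proof helper: A's backward fold, named (A's loop after List.foldl_reverse)
def refFold (actual : List Int) (l : List Int) : Bool × Int × Int :=
  l.foldr (fun p s => lrpStep actual s p) (false, 1, 1)

-- key invariant: B's forward fold from an arbitrary state, expressed through A's backward fold
lemma lrp_key (actual : List Int) (l : List Int) (t0 : Int) (h0 : Bool) (m0 : Int) :
    l.foldl (lrpAltStep (PySem.Set.ofList actual)) (t0, h0, m0) =
      ((if (refFold actual l).1 then (refFold actual l).2.2 - (refFold actual l).2.1
        else t0 + ((refFold actual l).2.2 - (refFold actual l).2.1)),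
       h0 || (refFold actual l).1, m0 + ((refFold actual l).2.2 - 1)) := by
  induction l generalizing t0 h0 m0 with
  | nil => simp [refFold]
  | cons p l ih =>
    have hcons : refFold actual (p :: l) = lrpStep actual (refFold actual l) p := rfl
    rw [List.foldl_cons, ih, hcons]
    rcases hr : refFold actual l with ⟨f, r, d⟩
    simp only [lrpAltStep, lrpStep]
    by_cases hm : p ∈ actual <;> cases f <;> simp [hm, Prod.ext_iff] <;> omega

theorem lrp_spec : Claim_equal_lrp := by
  intro actual predicted _
  unfold Spec_lrp
  by_cases ha : actual = []
  · simp [lrp, lrp_alt, ha]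
  · by_cases hp : predicted = []
    · simp [lrp, lrp_alt, hp]
    · have hlen : predicted.length ≠ 0 ∧ actual.length ≠ 0 := by
        constructor <;> simp [List.length_eq_zero_iff, ha, hp]
      have hA : lrp actual predicted = refFold actual predicted := by
        unfold lrp refFold
        rw [if_pos hlen, List.foldl_reverse]
      have hB := lrp_key actual predicted 0 false 0
      rcases hr : refFold actual predicted with ⟨f, r, d⟩
      rw [hr] at hB
      have hAlt : lrp_alt actual predicted = (f, r, d) := by
        simp only [lrp_alt, if_neg (show ¬(actual = [] ∨ predicted = []) by simp [ha, hp]), hB]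
        cases f <;> simp
      rw [hA, hr, hAlt]
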